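-- pv_equiv track=rewrite | github.com/jk-jung/problem-solving | codewars/6kyu/6_Adjacent repeated words in a string.py | count_adjacent_pairs
-- ===== SOURCE A (Python) =====
-- def count_adjacent_pairs(s):
--     last, r, t = 1, 0, 0
--     for x in s.lower().split(' '):
--         if x == last:
--             if t == 0:
--                 r += 1
--             t = 1
--         else:
--             t = 0
--         last = x
--     return r
-- ===== SOURCE B (Python) =====
-- def count_adjacent_pairs(s):
--     # group-first decomposition: split the word list into maximal runs of
--     # equal adjacent words, count the runs of length >= 2
--     def count_runs(words):
--         if not words:
--             return 0
--         w = words[0]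
--         i = 1
--         while i < len(words) and words[i] == w:
--             i += 1
--         return (1 if i >= 2 else 0) + count_runs(words[i:])
--     return count_runs(s.lower().split(' '))
-- ===== Notes on version B (the rewrite author's own statement) =====
-- stated objective: alternative
-- what changed: B replaces A's single pass with a per-word in-a-run flag by an explicit recursive decomposition of the word list into maximal runs of equal adjacent words, counting the runs of length at least 2.
import Mathlib
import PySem

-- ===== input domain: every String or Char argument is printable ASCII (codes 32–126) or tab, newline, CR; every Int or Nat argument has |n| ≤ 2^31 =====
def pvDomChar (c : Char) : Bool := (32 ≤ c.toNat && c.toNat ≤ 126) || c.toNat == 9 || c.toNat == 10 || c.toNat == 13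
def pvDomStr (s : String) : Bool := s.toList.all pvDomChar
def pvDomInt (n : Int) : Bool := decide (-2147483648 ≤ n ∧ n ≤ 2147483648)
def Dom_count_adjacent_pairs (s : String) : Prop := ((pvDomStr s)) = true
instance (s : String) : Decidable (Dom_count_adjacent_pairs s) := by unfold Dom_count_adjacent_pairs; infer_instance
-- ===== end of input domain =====

-- B replaces A's single pass with a per-word in-a-run flag by an explicit recursive
-- decomposition into maximal runs of equal adjacent words (alternative, same cost).

-- ===== PORT A =====
-- A's loop state: last (initially the int 1, which never equals a word string:
-- modelled as Option String with none = the initial 1), r, t.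
def pvLoopA : List String → Option String → Int → Int → Int
  | [], _, r, _ => r
  | x :: xs, last, r, t =>
    if last == some x then
      pvLoopA xs (some x) (if t == 0 then r + 1 else r) 1
    else
      pvLoopA xs (some x) r 0

-- s.lower().split(' '); split? is `some` here because the separator " " ≠ ""
def count_adjacent_pairs (s : String) : Int :=
  pvLoopA ((PySem.Str.split? (PySem.Str.lower s) " ").getD []) none 0 0

-- ===== PORT B =====
-- Source B's count_runs: the while loop advancing i over words equal to the head
-- is takeWhile/dropWhile; recurse on the remainder words[i:].
def pvCountRuns : List String → Int
  | [] => 0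
  | w :: rest =>
    let same := rest.takeWhile (· == w)
    let rest' := rest.dropWhile (· == w)
    (if 1 + same.length ≥ 2 then 1 else 0) + pvCountRuns rest'
termination_by l => l.length
decreasing_by
  simp only [List.length_cons]
  exact Nat.lt_succ_of_le (List.dropWhile_sublist (p := (· == w)) (l := rest)).length_le

def count_adjacent_pairs_alt (s : String) : Int :=
  pvCountRuns ((PySem.Str.split? (PySem.Str.lower s) " ").getD [])

-- ===== PRECONDITION & SPEC =====
def Spec_count_adjacent_pairs (s : String) (out : Int) : Prop := out = count_adjacent_pairs_alt s
instance (s : String) (out : Int) : Decidable (Spec_count_adjacent_pairs s out) := by unfold Spec_count_adjacent_pairs; infer_instance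

-- ===== CLAIM (what is proved, stated in full; the proofs are below) =====
def Claim_equal_count_adjacent_pairs : Prop := ∀ (s : String), Dom_count_adjacent_pairs s → Spec_count_adjacent_pairs s (count_adjacent_pairs s)

-- ===== LEMMAS AND PROOFS =====

-- r is a pure accumulator of A's loop.
lemma pvLoopA_add (ws : List String) : ∀ (last : Option String) (r t : Int),
    pvLoopA ws last r t = r + pvLoopA ws last 0 t := by
  induction ws with
  | nil => intro last r t; simp [pvLoopA]
  | cons x xs ih =>
    intro last r t
    simp only [pvLoopA]
    split_ifs with h ht
    · rw [ih (some x) (r + 1) 1, ih (some x) (0 + 1) 1]; ring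
    · rw [ih (some x) r 1, ih (some x) 0 1]
    · rw [ih (some x) r 0, ih (some x) 0 0]

-- when the head of ws differs from last (or ws is empty), t is irrelevant
lemma pvLoopA_t_irrel (ws : List String) (w : String) (r : Int)
    (h : ∀ x, ws.head? = some x → x ≠ w) :
    pvLoopA ws (some w) r 1 = pvLoopA ws (some w) r 0 := by
  cases ws with
  | nil => rfl
  | cons x xs =>
    have hx : x ≠ w := h x rfl
    have : (some w == some x) = false := by simp [hx.symm]
    simp [pvLoopA, this]

-- inside a run of w's (r = 1, t = 1): nothing changes until the run ends
lemma pvLoopA_run (w : String) (ys : List String) (rest' : List String)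
    (hys : ∀ y ∈ ys, y = w) (hrest : ∀ x, rest'.head? = some x → x ≠ w) :
    pvLoopA (ys ++ rest') (some w) 1 1 = 1 + pvLoopA rest' (some w) 0 0 := by
  induction ys with
  | nil =>
    simp only [List.nil_append]
    rw [pvLoopA_t_irrel rest' w 1 hrest, pvLoopA_add]
  | cons y ys ih =>
    have hy : y = w := hys y (List.mem_cons_self ..)
    subst hy
    simp only [List.cons_append, pvLoopA, beq_self_eq_true, if_pos]
    have h10 : ((1 : Int) == 0) = false := by decide
    simp only [h10, Bool.false_eq_true, if_neg, not_false_iff]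
    exact ih (fun y hy => hys y (List.mem_cons_of_mem _ hy))

lemma head?_dropWhile_ne {α : Type} (p : α → Bool) (l : List α) :
    ∀ x, (l.dropWhile p).head? = some x → p x = false := by
  induction l with
  | nil => intro x h; simp at h
  | cons a l ih =>
    intro x h
    by_cases ha : p a
    · rw [List.dropWhile_cons_of_pos ha] at h; exact ih x h
    · rw [List.dropWhile_cons_of_neg ha] at h
      simp only [List.head?_cons, Option.some_inj] at h
      subst h; exact Bool.not_eq_true _ |>.mp ha

lemma dropWhile_self_of_takeWhile_nil {α : Type} (p : α → Bool) (l : List α)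
    (h : l.takeWhile p = []) : l.dropWhile p = l := by
  cases l with
  | nil => rfl
  | cons a l =>
    by_cases ha : p a
    · rw [List.takeWhile_cons_of_pos ha] at h; exact absurd h (by simp)
    · exact List.dropWhile_cons_of_neg ha

-- main invariant: starting fresh (r = 0, t = 0) with last different from the
-- head, A's loop counts exactly the runs of length ≥ 2
lemma pvLoopA_eq_countRuns : ∀ (n : Nat) (ws : List String) (last : Option String),
    ws.length ≤ n → (∀ x, ws.head? = some x → last ≠ some x) →
    pvLoopA ws last 0 0 = pvCountRuns ws := by
  intro n
  induction n with
  | zero =>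
    intro ws last hlen _
    have : ws = [] := List.eq_nil_of_length_eq_zero (Nat.le_zero.mp hlen)
    subst this; simp [pvLoopA, pvCountRuns]
  | succ n ih =>
    intro ws last hlen hhead
    cases ws with
    | nil => simp [pvLoopA, pvCountRuns]
    | cons w rest =>
      have hne : last ≠ some w := hhead w rfl
      have hcond : (last == some w) = false := by
        cases last with
        | none => rfl
        | some l => simp_all
      simp only [pvLoopA, hcond, Bool.false_eq_true, if_neg, not_false_iff]
      have hdecomp := List.takeWhile_append_dropWhile (p := (· == w)) (l := rest)
      have hrest'head := head?_dropWhile_ne (· == w) rest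
      have hrest'head' : ∀ x, (rest.dropWhile (· == w)).head? = some x → x ≠ w := by
        intro x hx
        have := hrest'head x hx
        simpa using this
      have hrestlen : rest.length ≤ n := by simpa using Nat.succ_le_succ_iff.mp hlen
      have hrest'len : (rest.dropWhile (· == w)).length ≤ n := by
        have h1 := (List.dropWhile_sublist (p := (· == w)) (l := rest)).length_le
        omega
      rw [pvCountRuns]
      cases htw : rest.takeWhile (· == w) with
      | nil =>
        have hrw : rest.dropWhile (· == w) = rest :=
          dropWhile_self_of_takeWhile_nil _ _ htw
        have hhead' : ∀ x, rest.head? = some x → (some w : Option String) ≠ some x := by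
          intro x hx hc
          injection hc with hc'
          exact hrest'head' x (by rw [hrw]; exact hx) hc'.symm
        rw [ih rest (some w) hrestlen hhead']
        simp [hrw]
      | cons y ys =>
        have hall : ∀ z ∈ y :: ys, z = w := by
          intro z hz
          have := List.mem_takeWhile_imp (htw ▸ hz)
          simpa using this
        have hy : y = w := hall y (List.mem_cons_self ..)
        have hrest : rest = w :: (ys ++ rest.dropWhile (· == w)) := by
          conv_lhs => rw [← hdecomp, htw, hy]
          simp
        conv_lhs => rw [hrest]
        rw [show pvLoopA (w :: (ys ++ rest.dropWhile (· == w))) (some w) 0 0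
              = pvLoopA (ys ++ rest.dropWhile (· == w)) (some w) 1 1 by
            simp [pvLoopA]]
        rw [pvLoopA_run w ys _ (fun z hz => hall z (List.mem_cons_of_mem _ hz)) hrest'head']
        rw [ih _ (some w) hrest'len (fun x hx hc => hrest'head' x hx (by injection hc with h'; exact h'.symm))]
        norm_num

-- ===== VERDICT (by name: the statement is the Claim_ definition above) =====
theorem count_adjacent_pairs_spec : Claim_equal_count_adjacent_pairs := by
  intro s _
  unfold Spec_count_adjacent_pairs count_adjacent_pairs count_adjacent_pairs_alt
  exact pvLoopA_eq_countRuns _ _ none le_rfl (by intro x _ h; simp at h)
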